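-- pv_equiv track=rewrite | github.com/chinmaykunkikar/UDCS-Assignments | personal_assignments/rhyme/rhyme_dictionary.py | get_rhyme
-- ===== SOURCE A (Python) =====
-- def get_pronunciation(in_word, entries):
--     for word, phone in entries:
--         if word == in_word:
--             return phone
--
-- def get_rhyme(in_word, entries):
--     matches = []
--     in_phone = get_pronunciation(in_word, entries)
--     if in_phone is None:
--         return None # word not in corpus
--     for word, phone in entries:
--         if word == in_word:
--             continue
--         i=1 # reverse iterator
--         n=0 # similarity of match
--         while True:
--             if len(in_phone) < i or len(phone) < i:
--                 break
--             elif phone[-i] != in_phone[-i]: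
--                 break
--             else:
--                 i+=1
--                 n+=1
--             if n>0:
--                 matches.append((n,word))
--     matches.sort()
--     matches.reverse()
--     return matches
-- ===== SOURCE B (Python) =====
-- def get_rhyme(in_word, entries):
--     # Level-by-level refinement: instead of walking each word's suffix and
--     # sorting all emitted tuples, keep the set of still-matching entries per
--     # suffix length j, record the survivors of each level, and build the
--     # result directly in descending order (levels from deepest to shallowest,
--     # each level's words sorted descending). No global sort is needed.
--     in_phone = None
--     for w, p in entries:
--         if w == in_word:
--             in_phone = p
--             break
--     if in_phone is None:
--         return None  # word not in corpus
--     candidates = [(w, p) for w, p in entries if w != in_word]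
--     levels = []
--     for j in range(1, len(in_phone) + 1):
--         candidates = [(w, p) for w, p in candidates
--                       if len(p) >= j and p[-j] == in_phone[-j]]
--         levels.append((j, [w for w, _ in candidates]))
--     out = []
--     for j, words in reversed(levels):
--         for w in sorted(words, reverse=True):
--             out.append((j, w))
--     return out
-- ===== Notes on version B (the rewrite author's own statement) =====
-- stated objective: alternative
-- what changed: B replaces A's per-word suffix walk (emitting (1..k, word) tuples) followed by a global sort-and-reverse with level-by-level refinement: it filters the candidate set once per suffix length j, records each level's surviving words, and assembles the result directly in descending order (deepest level first, each level's words sorted descending), so no global sort of the match tuples is performed.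
import Mathlib
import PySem

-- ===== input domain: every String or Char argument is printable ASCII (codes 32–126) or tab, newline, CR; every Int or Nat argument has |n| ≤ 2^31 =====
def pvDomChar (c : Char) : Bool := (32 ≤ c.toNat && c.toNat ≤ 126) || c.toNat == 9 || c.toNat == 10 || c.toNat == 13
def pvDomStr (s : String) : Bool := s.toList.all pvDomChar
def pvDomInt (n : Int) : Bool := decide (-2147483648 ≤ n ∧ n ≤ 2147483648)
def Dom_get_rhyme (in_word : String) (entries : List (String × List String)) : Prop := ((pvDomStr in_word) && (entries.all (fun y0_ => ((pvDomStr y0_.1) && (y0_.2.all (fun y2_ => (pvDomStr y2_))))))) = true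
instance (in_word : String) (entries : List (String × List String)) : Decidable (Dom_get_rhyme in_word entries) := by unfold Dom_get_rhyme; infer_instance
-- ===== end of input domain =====

-- B replaces A's per-word suffix walk + global sort by level-by-level refinement of the
-- candidate set, emitting the result directly in descending order with only per-level
-- word sorts and no global sort (objective: alternative).

-- ===== PORT A =====
def get_pronunciation (in_word : String) (entries : List (String × List String)) : Option (List String) :=
  match entries with
  | [] => none
  | (word, phone) :: rest =>
      if word = in_word then some phone else get_pronunciation in_word rest

-- the 'while True' loop of A: i reverse iterator, n similarity counter
def rhymeLoop (in_phone phone : List String) (word : String)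
    (i : Nat) (n : Int) (ms : List (Int × String)) : List (Int × String) :=
  if in_phone.length < i ∨ phone.length < i then ms
  else if PySem.List.pyGet? phone (-(i : Int)) ≠ PySem.List.pyGet? in_phone (-(i : Int)) then ms
  else
    let i' := i + 1
    let n' := n + 1
    let ms' := if n' > 0 then ms ++ [(n', word)] else ms
    rhymeLoop in_phone phone word i' n' ms'
termination_by in_phone.length + 1 - i
decreasing_by simp_all; omega

def get_rhyme (in_word : String) (entries : List (String × List String)) : Option (List (Int × String)) :=
  match get_pronunciation in_word entries with
  | none => none
  | some in_phone =>
      let ms := entries.foldl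
        (fun acc wp => if wp.1 = in_word then acc else rhymeLoop in_phone wp.2 wp.1 1 0 acc) []
      some ((PySem.List.sorted2 ms Prod.fst Prod.snd false).reverse)

-- ===== PORT B =====
-- Level-by-level refinement: candidates surviving suffix length j, one level list per j,
-- output built from the deepest level down, each level's words sorted descending.
def get_rhyme_alt (in_word : String) (entries : List (String × List String)) : Option (List (Int × String)) :=
  match (entries.find? (fun wp => wp.1 == in_word)).map Prod.snd with
  | none => none
  | some in_phone =>
      let cands0 := entries.filter (fun wp => decide (wp.1 ≠ in_word))
      let st := (PySem.List.pyRange 1 ((in_phone.length : Int) + 1) 1).foldl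
        (fun st j =>
          let c := st.1.filter (fun wp =>
            decide (j ≤ (wp.2.length : Int)) &&
            (PySem.List.pyGet? wp.2 (-j) == PySem.List.pyGet? in_phone (-j)))
          (c, st.2 ++ [(j, c.map Prod.fst)]))
        (cands0, ([] : List (Int × List String)))
      some (st.2.reverse.foldl
        (fun out jl =>
          (PySem.List.sorted jl.2 (fun w => w) true).foldl
            (fun out2 w => out2 ++ [(jl.1, w)]) out) [])

-- ===== PRECONDITION & SPEC =====
def Spec_get_rhyme (in_word : String) (entries : List (String × List String)) (out : Option (List (Int × String))) : Prop := out = get_rhyme_alt in_word entries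
instance (in_word : String) (entries : List (String × List String)) (out : Option (List (Int × String))) : Decidable (Spec_get_rhyme in_word entries out) := by unfold Spec_get_rhyme; infer_instance

-- ===== CLAIM =====
def Claim_equal_get_rhyme : Prop := ∀ (in_word : String) (entries : List (String × List String)), Dom_get_rhyme in_word entries → Spec_get_rhyme in_word entries (get_rhyme in_word entries)

-- ===== LEMMAS AND PROOFS =====

-- length of the longest common prefix (used on reversed phone lists)
def sAux : List String → List String → Nat
  | a :: as, b :: bs => if a ≠ b then 0 else sAux as bs + 1
  | _, _ => 0

def ovl (phone in_phone : List String) : Nat := sAux phone.reverse in_phone.reverse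

-- the multiset of matches A accumulates
def msOf (in_word : String) (in_phone : List String) (entries : List (String × List String)) :
    List (Int × String) :=
  entries.flatMap (fun wp =>
    if wp.1 ≠ in_word then (List.range (ovl wp.2 in_phone)).map (fun j : Nat => ((j : Int) + 1, wp.1)) else [])

-- B's survivor predicate at level j
def surv (in_word : String) (in_phone : List String) (j : Nat) (wp : String × List String) : Bool :=
  decide (wp.1 ≠ in_word) && decide (j ≤ ovl wp.2 in_phone)

theorem sAux_le (as bs : List String) : sAux as bs ≤ as.length ∧ sAux as bs ≤ bs.length := by
  induction as generalizing bs with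
  | nil => cases bs <;> simp [sAux]
  | cons a as ih =>
      cases bs with
      | nil => simp [sAux]
      | cons b bs =>
          by_cases h : a = b
          · have := ih bs
            simp [sAux, h]; omega
          · simp [sAux, h]

theorem succ_le_sAux (as bs : List String) (j : Nat) (hb : j < bs.length) :
    j + 1 ≤ sAux as bs ↔ (j ≤ sAux as bs ∧ j < as.length ∧ as[j]? = bs[j]?) := by
  induction as generalizing bs j with
  | nil =>
      cases bs <;> simp [sAux]
  | cons a as ih =>
      cases bs with
      | nil => simp at hb
      | cons b bs =>
          by_cases h : a = b
          · subst h
            have hred : sAux (a :: as) (a :: bs) = sAux as bs + 1 := by simp [sAux]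
            cases j with
            | zero => simp [hred]
            | succ j' =>
                have hb' : j' < bs.length := by simpa using hb
                have key := ih bs j' hb'
                rw [hred]
                simp only [List.getElem?_cons_succ, List.length_cons]
                constructor
                · intro hle
                  have h2 := key.mp (by omega)
                  exact ⟨by omega, by omega, h2.2.2⟩
                · rintro ⟨h1, h2, h3⟩
                  have := key.mpr ⟨by omega, by omega, h3⟩
                  omega
          · cases j with
            | zero => simp [sAux, h]
            | succ j' => simp [sAux, h]

theorem get_pronunciation_eq_find (in_word : String) (entries : List (String × List String)) :
    get_pronunciation in_word entries = (entries.find? (fun wp => wp.1 == in_word)).map Prod.snd := by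
  induction entries with
  | nil => rfl
  | cons hd tl ih =>
      obtain ⟨w, p⟩ := hd
      by_cases h : w = in_word
      · simp [get_pronunciation, List.find?, h]
      · have hb : (w == in_word) = false := by simp [h]
        simp [get_pronunciation, List.find?, h, hb, ih]

theorem rhymeLoop_eq (in_phone phone : List String) (word : String)
    (i : Nat) (n : Int) (acc : List (Int × String)) (hi : 1 ≤ i) (hn : 0 ≤ n) :
    rhymeLoop in_phone phone word i n acc =
      acc ++ (List.range (sAux (phone.reverse.drop (i - 1)) (in_phone.reverse.drop (i - 1)))).map
        (fun j : Nat => ((n + (j : Int) + 1 : Int), word)) := by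
  have aux_nil_left : ∀ ys : List String, sAux [] ys = 0 := by
    intro ys; cases ys <;> rfl
  have aux_nil_right : ∀ xs : List String, sAux xs [] = 0 := by
    intro xs; cases xs <;> rfl
  induction i, n, acc using rhymeLoop.induct in_phone phone word with
  | case1 i n acc hstop =>
      rw [rhymeLoop, if_pos hstop]
      rcases hstop with hstop | hstop
      · rw [List.drop_eq_nil_of_le (as := in_phone.reverse) (by simp; omega), aux_nil_right]
        simp
      · rw [List.drop_eq_nil_of_le (as := phone.reverse) (by simp; omega), aux_nil_left]
        simp
  | case2 i n acc hstop hne =>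
      rw [rhymeLoop, if_neg hstop, if_pos hne]
      have hip : i ≤ in_phone.length := by omega
      have hpp : i ≤ phone.length := by omega
      rw [PySem.List.pyGet?_neg_natCast phone i hi hpp,
          PySem.List.pyGet?_neg_natCast in_phone i hi hip] at hne
      have h1 : i - 1 < phone.reverse.length := by simp; omega
      have h2 : i - 1 < in_phone.reverse.length := by simp; omega
      rw [List.drop_eq_getElem_cons h1, List.drop_eq_getElem_cons h2]
      have hne' : phone.reverse[i-1]'h1 ≠ in_phone.reverse[i-1]'h2 := by
        rw [List.getElem_reverse, List.getElem_reverse]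
        have e1 : phone.length - 1 - (i-1) = phone.length - i := by omega
        have e2 : in_phone.length - 1 - (i-1) = in_phone.length - i := by omega
        simp only [e1, e2]
        intro hcon
        apply hne
        rw [List.getElem?_eq_getElem (by omega : phone.length - i < phone.length),
            List.getElem?_eq_getElem (by omega : in_phone.length - i < in_phone.length), hcon]
      rw [sAux, if_pos hne']
      simp
  | case3 i n acc hstop heq i' n' ms' ih =>
      push Not at heq
      have hip : i ≤ in_phone.length := by omega
      have hpp : i ≤ phone.length := by omega
      have hiv : i' = i + 1 := rfl
      have hnv : n' = n + 1 := rfl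
      have hmv : ms' = acc ++ [(n + 1, word)] := by
        show (if n + 1 > 0 then acc ++ [(n + 1, word)] else acc) = _
        rw [if_pos (by omega)]
      rw [hiv, hnv, hmv] at ih
      have ih' := ih (by omega) (by omega)
      rw [rhymeLoop, if_neg hstop, if_neg (by simpa using heq)]
      simp only []
      rw [show (if n + 1 > 0 then acc ++ [(n + 1, word)] else acc) = acc ++ [(n + 1, word)] from if_pos (by omega)]
      rw [ih']
      rw [PySem.List.pyGet?_neg_natCast phone i hi hpp,
          PySem.List.pyGet?_neg_natCast in_phone i hi hip] at heq
      have h1 : i - 1 < phone.reverse.length := by simp; omega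
      have h2 : i - 1 < in_phone.reverse.length := by simp; omega
      rw [List.drop_eq_getElem_cons h1, List.drop_eq_getElem_cons h2]
      have heq' : phone.reverse[i-1]'h1 = in_phone.reverse[i-1]'h2 := by
        rw [List.getElem_reverse, List.getElem_reverse]
        have e1 : phone.length - 1 - (i-1) = phone.length - i := by omega
        have e2 : in_phone.length - 1 - (i-1) = in_phone.length - i := by omega
        simp only [e1, e2]
        have := heq
        rw [List.getElem?_eq_getElem (by omega : phone.length - i < phone.length),
            List.getElem?_eq_getElem (by omega : in_phone.length - i < in_phone.length)] at this
        exact Option.some.inj this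
      rw [sAux, if_neg (by simpa using heq')]
      simp only [show i + 1 - 1 = (i - 1) + 1 from by omega]
      rw [List.range_succ_eq_map, List.map_cons, List.map_map]
      simp only [List.append_assoc, List.singleton_append]
      congr 1
      congr 1
      · simp
      · apply List.map_congr_left
        intro j _
        simp only [Function.comp, Prod.mk.injEq, Nat.succ_eq_add_one]
        refine ⟨by push_cast; ring, trivial⟩

-- A's whole match-collecting loop is the flatMap msOf
theorem A_fold_eq (in_word : String) (in_phone : List String) (entries : List (String × List String)) :
    entries.foldl (fun acc wp => if wp.1 = in_word then acc else rhymeLoop in_phone wp.2 wp.1 1 0 acc) [] =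
      msOf in_word in_phone entries := by
  have hbody : (fun (acc : List (Int × String)) (wp : String × List String) =>
        if wp.1 = in_word then acc else rhymeLoop in_phone wp.2 wp.1 1 0 acc) =
      (fun acc wp => acc ++ (if wp.1 ≠ in_word then
          (List.range (ovl wp.2 in_phone)).map (fun j : Nat => ((j : Int) + 1, wp.1)) else [])) := by
    funext acc wp
    by_cases h : wp.1 = in_word
    · simp [h]
    · simp only [h, if_neg, ne_eq, not_false_iff, if_pos]
      rw [rhymeLoop_eq _ _ _ 1 0 acc le_rfl le_rfl]
      simp only [List.drop_zero, Nat.sub_self, ovl]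
      congr 1
      apply List.map_congr_left
      intro j _
      simp only [Prod.mk.injEq]
      exact ⟨by omega, trivial⟩
  rw [hbody, PySem.List.foldl_append_eq_flatMap, List.nil_append, msOf]

-- Python's tuple sort is the sort by the lexicographic key
theorem sorted2_eq_sorted_toLex (xs : List (Int × String)) :
    PySem.List.sorted2 xs Prod.fst Prod.snd false =
      PySem.List.sorted xs (fun x => toLex x) false := by
  have hbefore : (fun (a b : Int × String) =>
        decide (a.1 < b.1) || (!decide (b.1 < a.1) && decide (a.2 < b.2))) =
      (fun a b => decide (toLex a < toLex b)) := by
    funext a b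
    by_cases h1 : a.1 < b.1 <;> by_cases h2 : b.1 < a.1 <;> by_cases h3 : a.2 < b.2 <;>
      simp [Prod.Lex.toLex_lt_toLex, h1, h2, h3] <;> omega
  simp only [PySem.List.sorted2, PySem.List.sorted, Bool.false_eq_true, if_false]
  rw [hbefore]

-- filter of a range by an upper bound
theorem filter_range_le (n m : Nat) (h : m ≤ n) :
    (List.range n).filter (fun k => decide (k + 1 ≤ m)) = List.range m := by
  induction n with
  | zero => simp; omega
  | succ n ih =>
      by_cases hm : m = n + 1
      · subst hm
        rw [List.filter_eq_self.mpr]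
        intro k hk
        simp at hk ⊢; omega
      · have hmn : m ≤ n := by omega
        rw [List.range_succ, List.filter_append, ih hmn]
        simp; omega

-- transpose: interleaved per-level contributions are a permutation of blockwise contributions
theorem flatMap_if_cons_perm {β : Type} (L : List Nat) (q : Nat → Bool) (f : Nat → β) (g : Nat → List β) :
    (L.flatMap (fun j => if q j then f j :: g j else g j)).Perm
      ((L.filter q).map f ++ L.flatMap g) := by
  induction L with
  | nil => simp
  | cons j L ih =>
      have hswap : ∀ (x y z : List β), (x ++ (y ++ z)).Perm (y ++ (x ++ z)) := by
        intro x y z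
        rw [← List.append_assoc, ← List.append_assoc]
        exact List.perm_append_comm.append_right z
      cases hq : q j with
      | true =>
          simp only [List.flatMap_cons, List.filter_cons, hq, if_true, List.map_cons,
            List.cons_append]
          exact ((ih.append_left (g j)).cons (f j)).trans ((hswap _ _ _).cons (f j))
      | false =>
          simp only [List.flatMap_cons, List.filter_cons, hq, Bool.false_eq_true, if_false]
          exact (ih.append_left (g j)).trans (hswap _ _ _)

-- the interleaved level contributions are a permutation of A's multiset
theorem levels_perm_msOf (in_word : String) (in_phone : List String)
    (entries : List (String × List String)) :
    ((List.range in_phone.length).flatMap (fun k =>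
        ((entries.filter (surv in_word in_phone (k + 1))).map
          (fun wp => (((1 : Int) + (k : Int), wp.1) : Int × String))))).Perm
      (msOf in_word in_phone entries) := by
  induction entries with
  | nil => simp [msOf]
  | cons wp tl ih =>
      have hfun : (fun k : Nat =>
            (List.filter (surv in_word in_phone (k + 1)) (wp :: tl)).map
              (fun wp => (((1 : Int) + (k : Int), wp.1) : Int × String))) =
          (fun k : Nat =>
            if surv in_word in_phone (k + 1) wp
            then (fun k : Nat => (((1 : Int) + (k : Int), wp.1) : Int × String)) k ::
              (List.filter (surv in_word in_phone (k + 1)) tl).map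
                (fun wp => (((1 : Int) + (k : Int), wp.1) : Int × String))
            else (List.filter (surv in_word in_phone (k + 1)) tl).map
              (fun wp => (((1 : Int) + (k : Int), wp.1) : Int × String))) := by
        funext k
        cases h : surv in_word in_phone (k + 1) wp <;> simp [h]
      rw [show msOf in_word in_phone (wp :: tl) =
            (if wp.1 ≠ in_word then
              (List.range (ovl wp.2 in_phone)).map (fun j : Nat => ((j : Int) + 1, wp.1)) else []) ++
            msOf in_word in_phone tl from rfl]
      rw [hfun]
      refine (flatMap_if_cons_perm _ _ _ _).trans (List.Perm.append ?_ ih)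
      by_cases hw : wp.1 = in_word
      · have hnil : (List.range in_phone.length).filter
            (fun k => surv in_word in_phone (k + 1) wp) = [] := by
          apply List.filter_eq_nil_iff.mpr
          intro k _
          simp [surv, hw]
        simp [hnil, hw]
      · have hk : ovl wp.2 in_phone ≤ in_phone.length := by
          have := sAux_le wp.2.reverse in_phone.reverse
          simpa [ovl] using this.2
        have hfilter : (List.range in_phone.length).filter
            (fun k => surv in_word in_phone (k + 1) wp) = List.range (ovl wp.2 in_phone) := by
          have hp : (fun k => surv in_word in_phone (k + 1) wp) =
              (fun k => decide (k + 1 ≤ ovl wp.2 in_phone)) := by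
            funext k; simp [surv, hw]
          rw [hp, filter_range_le _ _ hk]
        rw [hfilter, if_pos hw,
          List.map_congr_left (fun j _ => by rw [Int.add_comm] :
            ∀ j ∈ List.range (ovl wp.2 in_phone),
              (((1 : Int) + (j : Int), wp.1) : Int × String) = ((j : Int) + 1, wp.1))]

-- one refinement step tightens the survivor predicate by one level
theorem step_pred (in_word : String) (in_phone : List String) (m : Nat)
    (hm : m < in_phone.length) (wp : String × List String) :
    ((decide ((1 : Int) + (m : Int) ≤ (wp.2.length : Int)) &&
      (PySem.List.pyGet? wp.2 (-((1 : Int) + (m : Int))) ==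
        PySem.List.pyGet? in_phone (-((1 : Int) + (m : Int))))) &&
     surv in_word in_phone m wp) = surv in_word in_phone (m + 1) wp := by
  have hcast : -((1 : Int) + (m : Int)) = -(((m + 1 : Nat) : Int)) := by push_cast; ring
  rw [hcast]
  by_cases hlen : m + 1 ≤ wp.2.length
  · rw [PySem.List.pyGet?_neg_natCast wp.2 (m + 1) (by omega) hlen,
        PySem.List.pyGet?_neg_natCast in_phone (m + 1) (by omega) (by omega)]
    have h1 : wp.2[wp.2.length - (m + 1)]? = wp.2.reverse[m]? := by
      rw [List.getElem?_reverse (by omega)]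
      congr 1
      omega
    have h2 : in_phone[in_phone.length - (m + 1)]? = in_phone.reverse[m]? := by
      rw [List.getElem?_reverse (by omega)]
      congr 1
      omega
    rw [h1, h2]
    have hchar := succ_le_sAux wp.2.reverse in_phone.reverse m (by simpa using hm)
    simp only [surv, ovl]
    apply Bool.eq_iff_iff.mpr
    simp only [Bool.and_eq_true, decide_eq_true_eq, beq_iff_eq]
    constructor
    · rintro ⟨⟨hl, hg⟩, hw, ho⟩
      exact ⟨hw, hchar.mpr ⟨ho, by simpa using hlen, hg⟩⟩
    · rintro ⟨hw, ho⟩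
      have := hchar.mp ho
      exact ⟨⟨by omega, this.2.2⟩, hw, by omega⟩
  · have hno : surv in_word in_phone (m + 1) wp = false := by
      have hle := (sAux_le wp.2.reverse in_phone.reverse).1
      simp only [surv, ovl, Bool.and_eq_false_iff, decide_eq_false_iff_not]
      right
      simp at hle ⊢
      omega
    rw [hno]
    have : decide ((1 : Int) + (m : Int) ≤ (wp.2.length : Int)) = false := by
      simp; omega
    simp [this]

-- B's level fold invariant
theorem B_fold_inv (in_word : String) (in_phone : List String)
    (entries : List (String × List String)) (m : Nat) (hm : m ≤ in_phone.length) :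
    ((List.range m).map (fun k : Nat => (1 : Int) + (k : Int))).foldl
        (fun st j =>
          let c := st.1.filter (fun wp =>
            decide (j ≤ (wp.2.length : Int)) &&
            (PySem.List.pyGet? wp.2 (-j) == PySem.List.pyGet? in_phone (-j)))
          (c, st.2 ++ [(j, c.map Prod.fst)]))
        (entries.filter (fun wp => decide (wp.1 ≠ in_word)), ([] : List (Int × List String))) =
      (entries.filter (surv in_word in_phone m),
       (List.range m).map (fun k : Nat =>
         ((1 : Int) + (k : Int), (entries.filter (surv in_word in_phone (k + 1))).map Prod.fst))) := by
  induction m with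
  | zero =>
      simp only [List.range_zero, List.map_nil, List.foldl_nil]
      congr 1
      apply List.filter_congr
      intro wp _
      simp [surv]
  | succ m ih =>
      have ih' := ih (by omega)
      rw [List.range_succ, List.map_append, List.foldl_append, ih']
      simp only [List.map_cons, List.map_nil, List.foldl_cons, List.foldl_nil]
      have hc : (entries.filter (surv in_word in_phone m)).filter (fun wp =>
            decide ((1 : Int) + (m : Int) ≤ (wp.2.length : Int)) &&
            (PySem.List.pyGet? wp.2 (-((1 : Int) + (m : Int))) ==
              PySem.List.pyGet? in_phone (-((1 : Int) + (m : Int))))) =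
          entries.filter (surv in_word in_phone (m + 1)) := by
        rw [List.filter_filter]
        apply List.filter_congr
        intro wp _
        exact step_pred in_word in_phone m (by omega) wp
      simp only [hc]
      simp

-- flatten of a reversed list of lists is a permutation of the flatten
theorem flatten_reverse_perm {α : Type} (L : List (List α)) :
    L.reverse.flatten.Perm L.flatten := by
  induction L with
  | nil => simp
  | cons x L ih =>
      simp only [List.reverse_cons, List.flatten_append, List.flatten_cons, List.flatten_nil,
        List.append_nil]
      exact (ih.append_right x).trans List.perm_append_comm

theorem flatten_map_perm {α β : Type} (L : List α) (f g : α → List β)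
    (h : ∀ x ∈ L, (f x).Perm (g x)) : ((L.map f).flatten).Perm ((L.map g).flatten) := by
  induction L with
  | nil => simp
  | cons x L ih =>
      simp only [List.map_cons, List.flatten_cons]
      exact (h x (by simp)).append (ih (fun y hy => h y (by simp [hy])))

-- descending lexicographic sortedness of B's output
theorem B_out_pairwise (in_word : String) (in_phone : List String)
    (entries : List (String × List String)) :
    List.Pairwise (fun a b : Int × String => toLex b ≤ toLex a)
      ((((List.range in_phone.length).map (fun k : Nat =>
          ((1 : Int) + (k : Int), (entries.filter (surv in_word in_phone (k + 1))).map Prod.fst))).reverse).flatMap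
        (fun jl => (PySem.List.sorted jl.2 (fun w => w) true).map (fun w => (jl.1, w)))) := by
  rw [List.flatMap_def]
  apply List.pairwise_flatten.mpr
  constructor
  · intro l hl
    simp only [List.mem_map, List.mem_reverse, List.mem_range] at hl
    obtain ⟨jl, ⟨k, hk, rfl⟩, rfl⟩ := hl
    rw [List.pairwise_map]
    refine (PySem.List.sorted_pairwise_rev _ _).imp ?_
    intro a b h
    exact Prod.Lex.toLex_le_toLex.mpr (Or.inr ⟨rfl, h⟩)
  · rw [List.pairwise_map, List.pairwise_reverse, List.pairwise_map]
    refine List.pairwise_lt_range.imp ?_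
    intro k1 k2 hlt x hx y hy
    simp only [List.mem_map] at hx hy
    obtain ⟨wx, _, rfl⟩ := hx
    obtain ⟨wy, _, rfl⟩ := hy
    exact Prod.Lex.toLex_le_toLex.mpr (Or.inl (by simp; omega))

theorem B_out_eq (in_word : String) (in_phone : List String)
    (entries : List (String × List String)) :
    (((List.range in_phone.length).map (fun k : Nat =>
        ((1 : Int) + (k : Int), (entries.filter (surv in_word in_phone (k + 1))).map Prod.fst))).reverse).flatMap
      (fun jl => (PySem.List.sorted jl.2 (fun w => w) true).map (fun w => (jl.1, w))) =
    (PySem.List.sorted2 (msOf in_word in_phone entries) Prod.fst Prod.snd false).reverse := by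
  apply PySem.List.eq_of_perm_of_pairwise_le_of_injective
    (key := fun x : Int × String => OrderDual.toDual (toLex x))
  · intro a b hab
    exact toLex.injective (OrderDual.toDual.injective hab)
  · -- both sides are permutations of A's multiset msOf
    have hB : ((((List.range in_phone.length).map (fun k : Nat =>
          ((1 : Int) + (k : Int), (entries.filter (surv in_word in_phone (k + 1))).map Prod.fst))).reverse).flatMap
        (fun jl => (PySem.List.sorted jl.2 (fun w => w) true).map (fun w => (jl.1, w)))).Perm
        (msOf in_word in_phone entries) := by
      rw [List.flatMap_def, ← List.map_reverse, List.map_map, List.map_reverse]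
      refine (flatten_reverse_perm _).trans ?_
      refine (flatten_map_perm _ _
          (fun k : Nat => ((entries.filter (surv in_word in_phone (k + 1))).map Prod.fst).map
            (fun w => ((1 : Int) + (k : Int), w))) ?_).trans ?_
      · intro k _
        exact (PySem.List.sorted_perm _ _ _).map _
      · rw [show (fun k : Nat =>
              ((entries.filter (surv in_word in_phone (k + 1))).map Prod.fst).map
                (fun w => ((1 : Int) + (k : Int), w))) =
            (fun k : Nat => (entries.filter (surv in_word in_phone (k + 1))).map
              (fun wp => (((1 : Int) + (k : Int), wp.1) : Int × String))) from
          funext (fun k => by rw [List.map_map]; rfl)]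
        rw [← List.flatMap_def]
        exact levels_perm_msOf in_word in_phone entries
    have hA : ((PySem.List.sorted2 (msOf in_word in_phone entries) Prod.fst Prod.snd false).reverse).Perm
        (msOf in_word in_phone entries) :=
      (List.reverse_perm _).trans (PySem.List.sorted2_perm _ _ _ _)
    exact hB.trans hA.symm
  · exact (B_out_pairwise in_word in_phone entries).imp
      (fun h => OrderDual.toDual_le_toDual.mpr h)
  · rw [sorted2_eq_sorted_toLex]
    exact List.pairwise_reverse.mpr
      ((PySem.List.sorted_pairwise _ _).imp (fun h => OrderDual.toDual_le_toDual.mpr h))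

-- ===== VERDICT =====
theorem get_rhyme_spec : Claim_equal_get_rhyme := by
  intro in_word entries _
  unfold Spec_get_rhyme get_rhyme get_rhyme_alt
  rw [get_pronunciation_eq_find]
  cases hfind : (entries.find? (fun wp => wp.1 == in_word)).map Prod.snd with
  | none => rfl
  | some in_phone =>
      simp only
      rw [A_fold_eq]
      -- rewrite B's pyRange to a mapped List.range, apply the fold invariant, then the output shape
      have hrange : PySem.List.pyRange 1 ((in_phone.length : Int) + 1) 1 =
          (List.range in_phone.length).map (fun k : Nat => (1 : Int) + (k : Int)) := by
        rw [PySem.List.pyRange_one,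
          show (((in_phone.length : Int) + 1 - 1).toNat) = in_phone.length from by omega]
      have houter : ∀ (L : List (Int × List String)),
          L.foldl (fun out jl => (PySem.List.sorted jl.2 (fun w => w) true).foldl
            (fun out2 w => out2 ++ [(jl.1, w)]) out) ([] : List (Int × String)) =
          L.flatMap (fun jl => (PySem.List.sorted jl.2 (fun w => w) true).map (fun w => (jl.1, w))) := by
        intro L
        have hfn : (fun (out : List (Int × String)) (jl : Int × List String) =>
            (PySem.List.sorted jl.2 (fun w => w) true).foldl (fun out2 w => out2 ++ [(jl.1, w)]) out) =
            (fun out jl => out ++ (PySem.List.sorted jl.2 (fun w => w) true).map (fun w => (jl.1, w))) := by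
          funext out jl
          exact PySem.List.foldl_append_singleton_eq_map _ _ _
        rw [hfn, PySem.List.foldl_append_eq_flatMap, List.nil_append]
      simp only [hrange, B_fold_inv in_word in_phone entries in_phone.length le_rfl, houter,
        B_out_eq]
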